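-- pv_equiv track=rewrite | github.com/haudom/WAV_to_Hapticlabs_converter | src/main.py | splitListAtValueCrossing
-- ===== SOURCE A (Python) =====
-- def splitListAtValueCrossing(lst, value):
--   result = []
--   temp = []
--   for i in range(len(lst)-1):
--     if lst[i] >= value and lst[i+1] < value or lst[i] <= value and lst[i+1] > value:
--       if temp:
--         result.append(temp)
--       temp = []
--
--     temp.append(lst[i])
--
-- #wenn keine spilts gefunden werde, wird eingangsliste zurückgegeben
--   if result == []:
--     result.append(lst)
--   return result
-- ===== SOURCE B (Python) =====
-- def splitListAtValueCrossing(lst, value):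
--     # cut positions: index i where the pair (lst[i], lst[i+1]) crosses value;
--     # A restarts its running segment AT index i, so segments span between cut indices,
--     # the trailing segment is never emitted, and [lst] is the fallback when nothing was emitted.
--     cuts = [i for i in range(len(lst) - 1)
--             if (lst[i] >= value and lst[i + 1] < value) or (lst[i] <= value and lst[i + 1] > value)]
--     segs = []
--     prev = 0
--     for c in cuts:
--         if c > prev:
--             segs.append(lst[prev:c])
--         prev = c
--     return segs if segs else [lst]
-- ===== Notes on version B (the rewrite author's own statement) =====
-- stated objective: alternative
-- what changed: B first collects the crossing cut indices with one comprehension, then emits the slices between consecutive cut positions (never the trailing tail, matching A), instead of A's single loop that carries a growing temp segment and flushes it at each crossing.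
import Mathlib
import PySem

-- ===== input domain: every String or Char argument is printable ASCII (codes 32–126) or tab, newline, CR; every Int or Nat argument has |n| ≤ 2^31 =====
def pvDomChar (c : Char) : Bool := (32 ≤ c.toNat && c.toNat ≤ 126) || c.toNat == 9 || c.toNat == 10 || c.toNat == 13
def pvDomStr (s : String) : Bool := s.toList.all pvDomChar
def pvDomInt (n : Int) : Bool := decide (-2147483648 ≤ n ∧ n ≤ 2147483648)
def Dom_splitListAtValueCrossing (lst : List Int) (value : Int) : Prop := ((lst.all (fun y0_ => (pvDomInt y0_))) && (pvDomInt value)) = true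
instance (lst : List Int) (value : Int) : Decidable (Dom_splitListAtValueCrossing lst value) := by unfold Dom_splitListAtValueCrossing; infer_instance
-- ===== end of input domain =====

-- B re-decomposes the split: collect the crossing cut indices first, then slice between
-- consecutive cuts (same values as A; alternative decomposition, no speed claim).

-- ===== PORT A =====
-- loop body of A: maybe flush temp at a crossing, then append lst[i] to temp
def pvStepA (lst : List Int) (value : Int) (st : List (List Int) × List Int) (i : Int) :
    List (List Int) × List Int :=
  let a := PySem.List.pyGetD lst i 0
  let b := PySem.List.pyGetD lst (i + 1) 0
  let st :=
    if (a ≥ value ∧ b < value) ∨ (a ≤ value ∧ b > value) then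
      (if st.2 ≠ [] then (st.1 ++ [st.2], ([] : List Int)) else (st.1, ([] : List Int)))
    else st
  (st.1, st.2 ++ [a])

def splitListAtValueCrossing (lst : List Int) (value : Int) : List (List Int) :=
  let st := (PySem.List.pyRange 0 ((lst.length : Int) - 1) 1).foldl (pvStepA lst value) ([], [])
  if st.1 = [] then [lst] else st.1

-- ===== PORT B =====
-- crossing test of Source B's comprehension
def pvIsCutB (lst : List Int) (value : Int) (i : Int) : Bool :=
  let a := PySem.List.pyGetD lst i 0
  let b := PySem.List.pyGetD lst (i + 1) 0
  decide ((a ≥ value ∧ b < value) ∨ (a ≤ value ∧ b > value))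

-- loop body of Source B: emit lst[prev:c] when c > prev, move prev to c
def pvStepB (lst : List Int) (st : List (List Int) × Int) (c : Int) :
    List (List Int) × Int :=
  (if c > st.2 then st.1 ++ [PySem.List.slice lst (some st.2) (some c)] else st.1, c)

def splitListAtValueCrossing_alt (lst : List Int) (value : Int) : List (List Int) :=
  let cuts := (PySem.List.pyRange 0 ((lst.length : Int) - 1) 1).filter (pvIsCutB lst value)
  let st := cuts.foldl (pvStepB lst) ([], 0)
  if st.1 = [] then [lst] else st.1

-- ===== PRECONDITION & SPEC =====
def Spec_splitListAtValueCrossing (lst : List Int) (value : Int) (out : List (List Int)) : Prop := out = splitListAtValueCrossing_alt lst value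
instance (lst : List Int) (value : Int) (out : List (List Int)) : Decidable (Spec_splitListAtValueCrossing lst value out) := by unfold Spec_splitListAtValueCrossing; infer_instance

-- ===== CLAIM (what is proved, stated in full; the proofs are below) =====
def Claim_equal_splitListAtValueCrossing : Prop := ∀ (lst : List Int) (value : Int), Dom_splitListAtValueCrossing lst value → Spec_splitListAtValueCrossing lst value (splitListAtValueCrossing lst value)

-- ===== LEMMAS AND PROOFS =====

-- fold over a filtered list = fold over the whole list with a guarded step
theorem pv_foldl_filter {α β : Type} (p : α → Bool) (f : β → α → β) :
    ∀ (l : List α) (b : β),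
      (l.filter p).foldl f b = l.foldl (fun s x => if p x then f s x else s) b := by
  intro l
  induction l with
  | nil => intro b; rfl
  | cons x xs ih =>
      intro b
      by_cases h : p x = true
      · simp [h, ih]
      · simp [h, ih]

-- joint invariant of the two loops over range(0, n): same emitted segments,
-- A's temp is the slice of lst from B's prev to n
theorem pv_inv (lst : List Int) (value : Int) :
    ∀ n : Nat, n < lst.length →
      ∃ (segs : List (List Int)) (p : Nat),
        p ≤ n ∧
        (PySem.List.pyRange 0 (n : Int) 1).foldl
            (fun s x => if pvIsCutB lst value x then pvStepB lst s x else s) ([], 0)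
          = (segs, (p : Int)) ∧
        (PySem.List.pyRange 0 (n : Int) 1).foldl (pvStepA lst value) ([], [])
          = (segs, (lst.drop p).take (n - p)) := by
  intro n
  induction n with
  | zero =>
      intro _
      exact ⟨[], 0, le_refl 0, by simp [PySem.List.pyRange_one_eq_nil], by
        simp [PySem.List.pyRange_one_eq_nil]⟩
  | succ n ih =>
      intro hlt
      have hn : n < lst.length := Nat.lt_of_succ_lt hlt
      obtain ⟨segs, p, hp, hB, hA⟩ := ih hn
      have hrange : PySem.List.pyRange 0 ((n : Int) + 1) 1
          = PySem.List.pyRange 0 (n : Int) 1 ++ [(n : Int)] :=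
        PySem.List.pyRange_one_succ_right (by positivity)
      have hpush : (((n + 1 : Nat)) : Int) = (n : Int) + 1 := by push_cast; ring
      have ha : PySem.List.pyGetD lst (n : Int) 0 = lst[n] := by
        rw [PySem.List.pyGetD_natCast]
        exact List.getD_eq_getElem lst 0 hn
      have hslice : PySem.List.slice lst (some (p : Int)) (some (n : Int))
          = (lst.drop p).take (n - p) := PySem.List.slice_natCast lst p n
      have htake : (lst.drop p).take (n - p) ++ [lst[n]] = (lst.drop p).take (n + 1 - p) := by
        have h1 : n + 1 - p = (n - p) + 1 := by omega
        have h2 : (lst.drop p)[n - p]? = some lst[n] := by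
          rw [List.getElem?_drop]
          have : p + (n - p) = n := by omega
          rw [this, List.getElem?_eq_getElem hn]
        rw [h1, List.take_add_one, h2]
        rfl
      by_cases hc : pvIsCutB lst value (n : Int) = true
      · -- a crossing at index n
        have hcb := hc
        simp only [pvIsCutB, decide_eq_true_eq] at hc
        by_cases hpn : p < n
        · -- temp nonempty: flush it; B emits the same slice
          have hne : (lst.drop p).take (n - p) ≠ [] := by
            have : ((lst.drop p).take (n - p)).length = n - p := by
              rw [List.length_take, List.length_drop]
              omega
            intro hnil
            rw [hnil] at this
            simp at this
            omega
          refine ⟨segs ++ [(lst.drop p).take (n - p)], n, by omega, ?_, ?_⟩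
          · rw [hpush, hrange, List.foldl_append, hB]
            simp [hcb, pvStepB, hpn, hslice]
          · rw [hpush, hrange, List.foldl_append, hA]
            have : (n : Nat) + 1 - n = 1 := by omega
            simp only [ge_iff_le, gt_iff_lt, ha] at hc
            simp [pvStepA, ha, hc, hne, this, List.take_one_drop_eq_of_lt_length hn]
        · -- temp empty (prev = n): nothing to emit
          have hpe : p = n := by omega
          subst hpe
          refine ⟨segs, p, by omega, ?_, ?_⟩
          · rw [hpush, hrange, List.foldl_append, hB]
            simp [hcb, pvStepB]
          · rw [hpush, hrange, List.foldl_append, hA]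
            have : (p : Nat) + 1 - p = 1 := by omega
            simp only [ge_iff_le, gt_iff_lt, ha] at hc
            simp [pvStepA, ha, hc, this, List.take_one_drop_eq_of_lt_length hn]
      · -- no crossing: A extends temp, B's state is unchanged
        have hcb := hc
        simp only [pvIsCutB, decide_eq_true_eq] at hc
        refine ⟨segs, p, by omega, ?_, ?_⟩
        · rw [hpush, hrange, List.foldl_append, hB]
          simp [hcb]
        · rw [hpush, hrange, List.foldl_append, hA]
          simp only [ge_iff_le, gt_iff_lt, ha] at hc
          simp [pvStepA, ha, hc, htake]

-- ===== VERDICT (by name: the statement is the Claim_ definition above) =====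
theorem splitListAtValueCrossing_spec : Claim_equal_splitListAtValueCrossing := by
  intro lst value _
  unfold Spec_splitListAtValueCrossing splitListAtValueCrossing splitListAtValueCrossing_alt
  simp only [pv_foldl_filter]
  cases hlen : lst.length with
  | zero =>
      rw [PySem.List.pyRange_one_eq_nil (by norm_num : ((0:Nat):Int) - 1 ≤ 0)]
      simp
  | succ m =>
      have hm : m < lst.length := by omega
      obtain ⟨segs, p, _, hB, hA⟩ := pv_inv lst value m hm
      have hcast : (((m + 1 : Nat)) : Int) - 1 = (m : Int) := by push_cast; ring
      rw [hcast, hA, hB]
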